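-- pv_equiv track=rewrite | github.com/susieir/kattis | arrangement.py | allocate_rooms
-- ===== SOURCE A (Python) =====
-- def allocate_rooms(n,m):
--     """
--     Takes n rooms and m teams and
--     returns min number of teams per room
--     and number of rooms with an additional team
--     """
--     # Calculate room allocations
--     min_teams = m//n
--     add_teams = m%n
--
--     # Initialise counter and output string
--     counter = 0
--     output_str = ""
--
--     # Loop through each room
--     for i in range(n):
--         if counter < add_teams:
--             output_str+=f"{'*'*min_teams}*\n"
--         else:
--             output_str+=f"{'*'*min_teams}\n"
--         counter += 1
--     return output_str
-- ===== SOURCE B (Python) =====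
-- def allocate_rooms(n, m):
--     min_teams = m // n
--     add_teams = m % n
--     hi = '*' * min_teams + '*\n'
--     lo = '*' * min_teams + '\n'
--     return hi * add_teams + lo * (n - add_teams)
-- ===== Notes on version B (the rewrite author's own statement) =====
-- stated objective: simpler
-- what changed: Replaced the counter-driven per-room loop that appends line by line with closed-form string repetition: build the hi and lo line once and return hi*(m%n) + lo*(n - m%n).
import Mathlib
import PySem

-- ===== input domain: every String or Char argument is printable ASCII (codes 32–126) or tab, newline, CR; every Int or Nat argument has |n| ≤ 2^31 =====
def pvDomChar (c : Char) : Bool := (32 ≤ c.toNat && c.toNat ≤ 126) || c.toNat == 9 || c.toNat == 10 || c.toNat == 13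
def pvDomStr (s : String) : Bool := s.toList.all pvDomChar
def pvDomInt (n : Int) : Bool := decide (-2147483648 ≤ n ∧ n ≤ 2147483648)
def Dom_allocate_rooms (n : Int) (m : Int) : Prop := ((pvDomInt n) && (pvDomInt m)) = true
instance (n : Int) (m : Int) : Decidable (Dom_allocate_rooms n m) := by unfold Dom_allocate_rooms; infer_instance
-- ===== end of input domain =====

-- B replaces A's counter loop by closed-form string repetition (hi/lo line built once, repeated); objective: simpler. Return value only; no mutation involved.

-- ===== PORT A =====
-- '*' * k on a string: Python clamps non-positive k to the empty string (exact)
def starChars (k : Int) : List Char := List.replicate k.toNat '*'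

def allocate_rooms (n : Int) (m : Int) : String :=
  let min_teams := PySem.Int.floordiv m n
  let add_teams := PySem.Int.mod m n
  -- counter/output_str loop over range(n); strings carried as List Char, exact
  let st := (PySem.List.pyRange 0 n 1).foldl
    (fun (st : Int × List Char) _ =>
      if st.1 < add_teams then (st.1 + 1, st.2 ++ (starChars min_teams ++ ['*', '\n']))
      else (st.1 + 1, st.2 ++ (starChars min_teams ++ ['\n'])))
    (0, [])
  String.ofList st.2

-- ===== PORT B =====
-- s * k on a string: k concatenated copies, non-positive k gives '' (exact)
def strTimes (cs : List Char) (k : Int) : List Char := (List.replicate k.toNat cs).flatten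

def allocate_rooms_alt (n : Int) (m : Int) : String :=
  let min_teams := PySem.Int.floordiv m n
  let add_teams := PySem.Int.mod m n
  let hi := starChars min_teams ++ ['*', '\n']
  let lo := starChars min_teams ++ ['\n']
  String.ofList (strTimes hi add_teams ++ strTimes lo (n - add_teams))

-- ===== PRECONDITION & SPEC =====
-- Pre_ excludes exactly n = 0, where A raises ZeroDivisionError.
def Pre_allocate_rooms (n : Int) (m : Int) : Prop := n ≠ 0
instance (n : Int) (m : Int) : Decidable (Pre_allocate_rooms n m) := by unfold Pre_allocate_rooms; infer_instance

def pvWitness_allocate_rooms : Int × Int := (4, 10)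

def Spec_allocate_rooms (n : Int) (m : Int) (out : String) : Prop := out = allocate_rooms_alt n m
instance (n : Int) (m : Int) (out : String) : Decidable (Spec_allocate_rooms n m out) := by unfold Spec_allocate_rooms; infer_instance

-- ===== CLAIM (what is proved, stated in full; the proofs are below) =====
def Claim_equal_allocate_rooms : Prop := ∀ (n : Int) (m : Int), Dom_allocate_rooms n m → Pre_allocate_rooms n m → Spec_allocate_rooms n m (allocate_rooms n m)

-- ===== LEMMAS AND PROOFS =====

-- A's counter loop, characterised: the first (add - c) rooms (capped to the list length) get hi, the rest lo.
theorem loop_spec (add : Int) (hi lo : List Char) :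
    ∀ (l : List Int) (c : Int) (acc : List Char),
    (l.foldl
      (fun (st : Int × List Char) _ =>
        if st.1 < add then (st.1 + 1, st.2 ++ hi) else (st.1 + 1, st.2 ++ lo))
      (c, acc)).2
    = acc ++ (List.replicate ((add - c).toNat ⊓ l.length) hi).flatten
          ++ (List.replicate (l.length - ((add - c).toNat ⊓ l.length)) lo).flatten := by
  intro l
  induction l with
  | nil => intro c acc; simp
  | cons a l ih =>
    intro c acc
    simp only [List.foldl_cons, List.length_cons]
    by_cases h : c < add
    · simp only [if_pos h]
      rw [ih (c + 1) (acc ++ hi)]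
      have hk : (add - c).toNat ⊓ (l.length + 1)
          = ((add - (c + 1)).toNat ⊓ l.length) + 1 := by omega
      rw [hk, Nat.add_sub_add_right, List.replicate_succ, List.flatten_cons]
      simp [List.append_assoc]
    · simp only [if_neg h]
      rw [ih (c + 1) (acc ++ lo)]
      have hk : (add - c).toNat ⊓ (l.length + 1) = 0 := by omega
      have hk' : (add - (c + 1)).toNat ⊓ l.length = 0 := by omega
      rw [hk, hk']
      simp [List.replicate_succ, List.append_assoc]

-- ===== VERDICT (by name: the statement is the Claim_ definition above) =====
theorem allocate_rooms_spec : Claim_equal_allocate_rooms := by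
  intro n m _ hpre
  unfold Spec_allocate_rooms allocate_rooms allocate_rooms_alt
  simp only []
  rw [loop_spec]
  set add := PySem.Int.mod m n
  set hi := starChars (PySem.Int.floordiv m n) ++ ['*', '\n']
  set lo := starChars (PySem.Int.floordiv m n) ++ ['\n']
  rcases lt_or_gt_of_ne hpre with hn | hn
  · -- n < 0 : range(n) is empty and both repetition counts are non-positive
    have hb := PySem.Int.mod_neg_bounds (a := m) (b := n) hn
    rw [PySem.List.pyRange_one_eq_nil (by omega)]
    have h1 : add.toNat = 0 := by omega
    have h2 : (n - add).toNat = 0 := by omega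
    simp [strTimes, h1, h2]
  · -- 0 < n : 0 ≤ add < n, so the cap is add itself
    have h0 : 0 ≤ add := PySem.Int.mod_nonneg (a := m) hn
    have h1 : add < n := PySem.Int.mod_lt (a := m) hn
    have hlen : (PySem.List.pyRange 0 n 1).length = n.toNat := by
      rw [PySem.List.length_pyRange_one]; omega
    rw [hlen]
    have hk : (add - 0).toNat ⊓ n.toNat = add.toNat := by omega
    rw [hk]
    have h2 : (n - add).toNat = n.toNat - add.toNat := by omega
    simp [strTimes, h2]
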